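-- pv_equiv track=rewrite | github.com/pbarros78/python-examples-and-test | controles y tareas/controles/control4/control4_1.py | weirdCalc
-- ===== SOURCE A (Python) =====
-- def weirdCalc(lista):
--   i = 0
--   acum = 0
--   while i < len(lista):
--     if i % 2 == 0 :
--       acum = acum + lista[i]
--     else :
--       acum = acum + lista[i] // 10
--     i = i + 1
--
--   return acum
-- ===== SOURCE B (Python) =====
-- def weirdCalc(lista):
--     acum = 0
--     it = iter(lista)
--     for x in it:
--         acum += x
--         acum += next(it, 0) // 10
--     return acum
-- ===== Notes on version B (the rewrite author's own statement) =====
-- stated objective: alternative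
-- what changed: Replaces the indexed while-loop with its i % 2 parity branch by pairwise consumption of an iterator: each step adds one element in full and the next element floor-divided by 10, so no index and no parity test remain.
import Mathlib
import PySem

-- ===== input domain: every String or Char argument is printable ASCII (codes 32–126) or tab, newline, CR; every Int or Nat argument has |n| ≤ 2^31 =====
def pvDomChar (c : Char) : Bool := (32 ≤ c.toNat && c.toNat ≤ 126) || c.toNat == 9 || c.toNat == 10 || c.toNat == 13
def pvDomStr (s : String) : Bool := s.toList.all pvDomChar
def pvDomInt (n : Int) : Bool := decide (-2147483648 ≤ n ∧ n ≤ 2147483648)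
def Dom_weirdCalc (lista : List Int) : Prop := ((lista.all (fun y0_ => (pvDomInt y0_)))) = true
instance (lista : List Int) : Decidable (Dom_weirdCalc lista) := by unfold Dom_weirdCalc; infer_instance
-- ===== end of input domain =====

-- B replaces A's indexed while-loop with its i % 2 branch by pairwise iterator consumption
-- (add one element in full, the next one floor-divided by 10); same O(n) cost, no parity test.

-- ===== PORT A =====
-- while i < len(lista): if i % 2 == 0: acum += lista[i] else: acum += lista[i] // 10; i += 1
def weirdCalcGo (lista : List Int) (i : Nat) (acum : Int) : Int :=
  if h : i < lista.length then
    weirdCalcGo lista (i + 1)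
      (if i % 2 == 0 then acum + lista[i] else acum + PySem.Int.floordiv lista[i] 10)
  else acum
termination_by lista.length - i

def weirdCalc (lista : List Int) : Int := weirdCalcGo lista 0 0

-- ===== PORT B =====
-- for x in it: acum += x; acum += next(it, 0) // 10   (iterator consumed two at a time)
def weirdCalcAltGo (lista : List Int) (acum : Int) : Int :=
  match lista with
  | [] => acum
  | x :: rest =>
    match rest with
    | [] => acum + x + PySem.Int.floordiv 0 10      -- next(it, 0) returned the default 0
    | y :: rest' => weirdCalcAltGo rest' (acum + x + PySem.Int.floordiv y 10)

def weirdCalc_alt (lista : List Int) : Int := weirdCalcAltGo lista 0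

-- ===== PRECONDITION & SPEC =====
def Spec_weirdCalc (lista : List Int) (out : Int) : Prop := out = weirdCalc_alt lista
instance (lista : List Int) (out : Int) : Decidable (Spec_weirdCalc lista out) := by unfold Spec_weirdCalc; infer_instance

-- ===== CLAIM (what is proved, stated in full; the proofs are below) =====
def Claim_equal_weirdCalc : Prop := ∀ (lista : List Int), Dom_weirdCalc lista → Spec_weirdCalc lista (weirdCalc lista)

-- ===== LEMMAS AND PROOFS =====

-- reference sums: Te starts at an even index, To at an odd one
mutual
def pvTe : List Int → Int
  | [] => 0
  | x :: xs => x + pvTo xs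
def pvTo : List Int → Int
  | [] => 0
  | x :: xs => PySem.Int.floordiv x 10 + pvTe xs
end

theorem weirdCalcGo_eq (lista : List Int) :
    ∀ n i acum, lista.length - i = n →
      weirdCalcGo lista i acum =
        acum + (if i % 2 = 0 then pvTe (lista.drop i) else pvTo (lista.drop i)) := by
  intro n
  induction n with
  | zero =>
    intro i acum hn
    rw [weirdCalcGo]
    have hge : lista.length ≤ i := by omega
    simp [Nat.not_lt.mpr hge, List.drop_eq_nil_of_le hge]
    split <;> simp [pvTe, pvTo]
  | succ m ih =>
    intro i acum hn
    have hlt : i < lista.length := by omega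
    rw [weirdCalcGo]
    simp only [hlt, dite_true]
    rw [ih (i + 1) _ (by omega)]
    have hdrop : lista.drop i = lista[i] :: lista.drop (i + 1) :=
      List.drop_eq_getElem_cons hlt
    by_cases hp : i % 2 = 0
    · have hp1 : ¬ (i + 1) % 2 = 0 := by omega
      have hb : (i % 2 == 0) = true := by simp [hp]
      rw [hb, if_pos hp, if_neg hp1, hdrop]
      simp only [if_true, pvTe]
      ring
    · have hp1 : (i + 1) % 2 = 0 := by omega
      have hb : (i % 2 == 0) = false := by simp [hp]
      rw [hb, if_neg hp, if_pos hp1, hdrop]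
      simp only [Bool.false_eq_true, if_false, pvTo]
      ring

theorem weirdCalcAltGo_eq (lista : List Int) (acum : Int) :
    weirdCalcAltGo lista acum = acum + pvTe lista := by
  fun_induction weirdCalcAltGo with
  | case1 acum => simp [pvTe]
  | case2 acum x => simp [pvTe, pvTo, PySem.Int.floordiv]
  | case3 acum x y rest' ih =>
    rw [ih]
    simp only [pvTe, pvTo]
    ring

-- ===== VERDICT (by name: the statement is the Claim_ definition above) =====
theorem weirdCalc_spec : Claim_equal_weirdCalc := by
  intro lista _
  unfold Spec_weirdCalc weirdCalc weirdCalc_alt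
  rw [weirdCalcGo_eq lista (lista.length - 0) 0 0 rfl, weirdCalcAltGo_eq]
  simp
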